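-- pv_equiv track=rewrite | github.com/zuspec/zuspec-fe-pss | tests/python/test_helpers.py | generate_struct_hierarchy
-- ===== SOURCE A (Python) =====
-- def generate_struct_hierarchy(depth: int) -> str:
--     """
--     Generate nested struct hierarchy
--
--     Args:
--         depth: Nesting depth
--
--     Returns:
--         PSS source code string
--     """
--     lines = []
--     for i in range(depth):
--         indent = "    " * i
--         lines.append(f"{indent}struct S{i} {{")
--         if i < depth - 1:
--             lines.append(f"{indent}    S{i+1} nested;")
--         else:
--             lines.append(f"{indent}    int value;")
--
--     for i in range(depth - 1, -1, -1):
--         indent = "    " * i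
--         lines.append(f"{indent}}}")
--
--     return "\n".join(lines)
-- ===== SOURCE B (Python) =====
-- def generate_struct_hierarchy(depth: int) -> str:
--     """Inside-out re-implementation: start from the innermost struct and wrap
--     each outer struct around it, instead of a forward open-lines loop plus a
--     backward closing-brace loop."""
--     if depth <= 0:
--         return ""
--     i = depth - 1
--     indent = "    " * i
--     lines = [f"{indent}struct S{i} {{", f"{indent}    int value;", f"{indent}}}"]
--     for i in range(depth - 2, -1, -1):
--         indent = "    " * i
--         lines = [f"{indent}struct S{i} {{", f"{indent}    S{i+1} nested;", *lines, f"{indent}}}"]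
--     return "\n".join(lines)
-- ===== Notes on version B (the rewrite author's own statement) =====
-- stated objective: alternative
-- what changed: Replaces A's two separate loops (a forward loop emitting the open/body lines, then a backward loop emitting the closing braces) by a single inside-out construction: build the innermost struct's three lines first, then wrap each outer struct around the block (two header lines in front, its closing brace behind) and join once.
import Mathlib
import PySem

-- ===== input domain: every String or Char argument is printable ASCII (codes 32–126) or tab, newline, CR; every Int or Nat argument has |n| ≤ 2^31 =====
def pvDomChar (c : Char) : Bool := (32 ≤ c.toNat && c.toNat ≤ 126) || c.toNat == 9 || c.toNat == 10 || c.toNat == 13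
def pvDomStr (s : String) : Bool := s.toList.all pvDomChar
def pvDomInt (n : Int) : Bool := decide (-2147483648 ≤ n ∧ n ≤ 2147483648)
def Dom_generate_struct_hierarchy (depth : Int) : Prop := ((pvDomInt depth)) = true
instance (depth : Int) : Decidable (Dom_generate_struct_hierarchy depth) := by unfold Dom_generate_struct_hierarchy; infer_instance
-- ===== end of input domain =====

-- B replaces A's forward open-lines loop plus backward close-lines loop by one
-- recursion over the nesting structure (simpler decomposition; same cost).

-- ===== PORT A =====
-- literal port: build the open/body lines forward, then the closing braces backward, join by "\n"
def generate_struct_hierarchy (depth : Int) : String :=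
  let lines : List (List Char) :=
    (PySem.List.pyRange 0 depth 1).foldl (fun lines i =>
      let indent := PySem.List.pyRepeat "    ".toList i
      let lines := lines ++ [indent ++ "struct S".toList ++ PySem.Int.toChars i ++ " {".toList]
      if i < depth - 1 then
        lines ++ [indent ++ "    S".toList ++ PySem.Int.toChars (i + 1) ++ " nested;".toList]
      else
        lines ++ [indent ++ "    int value;".toList]) []
  let lines :=
    (PySem.List.pyRange (depth - 1) (-1) (-1)).foldl (fun lines i =>
      lines ++ [PySem.List.pyRepeat "    ".toList i ++ "}".toList]) lines
  String.ofList (PySem.Chars.join "\n".toList lines)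

-- ===== PORT B =====
-- port of Source B: build the innermost struct's three lines, then wrap each outer
-- struct around the block (two header lines in front, its closing brace behind), join once
def generate_struct_hierarchy_alt (depth : Int) : String :=
  if depth ≤ 0 then "" else
    let i := depth - 1
    let indent := PySem.List.pyRepeat "    ".toList i
    let lines : List (List Char) :=
      [indent ++ "struct S".toList ++ PySem.Int.toChars i ++ " {".toList,
       indent ++ "    int value;".toList,
       indent ++ "}".toList]
    let lines := (PySem.List.pyRange (depth - 2) (-1) (-1)).foldl (fun lines i =>
      let indent := PySem.List.pyRepeat "    ".toList i
      [indent ++ "struct S".toList ++ PySem.Int.toChars i ++ " {".toList,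
       indent ++ "    S".toList ++ PySem.Int.toChars (i + 1) ++ " nested;".toList]
      ++ lines ++ [indent ++ "}".toList]) lines
    String.ofList (PySem.Chars.join "\n".toList lines)

-- ===== PRECONDITION & SPEC =====
def Spec_generate_struct_hierarchy (depth : Int) (out : String) : Prop := out = generate_struct_hierarchy_alt depth
instance (depth : Int) (out : String) : Decidable (Spec_generate_struct_hierarchy depth out) := by unfold Spec_generate_struct_hierarchy; infer_instance

-- ===== CLAIM (what is proved, stated in full; the proofs are below) =====
def Claim_equal_generate_struct_hierarchy : Prop := ∀ (depth : Int), Dom_generate_struct_hierarchy depth → Spec_generate_struct_hierarchy depth (generate_struct_hierarchy depth)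

-- ===== LEMMAS AND PROOFS =====

-- the four kinds of lines, indexed by the struct number
def pvInd (i : Nat) : List Char := PySem.List.pyRepeat "    ".toList (i : Int)
def pvOpenL (i : Nat) : List Char := pvInd i ++ "struct S".toList ++ PySem.Int.toChars (i : Int) ++ " {".toList
def pvNestedL (i : Nat) : List Char := pvInd i ++ "    S".toList ++ PySem.Int.toChars ((i : Int) + 1) ++ " nested;".toList
def pvValL (i : Nat) : List Char := pvInd i ++ "    int value;".toList
def pvCloseL (i : Nat) : List Char := pvInd i ++ "}".toList

-- the line list A builds, for structs i, i+1, …, i+r-1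
def pvLines (i r : Nat) : List (List Char) :=
  (List.range r).flatMap (fun k => [pvOpenL (i + k), if k < r - 1 then pvNestedL (i + k) else pvValL (i + k)])
  ++ (List.range r).reverse.map (fun k => pvCloseL (i + k))

theorem pvfoldl_two {α β : Type} (f g h : α → List β) (p : α → Prop) [DecidablePred p]
    (l : List α) (acc : List (List β)) :
    l.foldl (fun acc x =>
      let acc := acc ++ [f x]
      if p x then acc ++ [g x] else acc ++ [h x]) acc
      = acc ++ l.flatMap (fun x => [f x, if p x then g x else h x]) := by
  induction l generalizing acc with
  | nil => simp
  | cons x t ih => simp only [List.foldl_cons, ih, List.flatMap_cons]; split_ifs <;> simp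

-- A's line list for r+2 levels peels off the outermost struct
theorem pvLines_succ (i r : Nat) :
    pvLines i (r + 2) = pvOpenL i :: pvNestedL i :: (pvLines (i + 1) (r + 1) ++ [pvCloseL i]) := by
  unfold pvLines
  have hA : (List.range (r + 2)).flatMap
        (fun k => [pvOpenL (i + k), if k < r + 2 - 1 then pvNestedL (i + k) else pvValL (i + k)])
      = [pvOpenL i, pvNestedL i] ++ (List.range (r + 1)).flatMap
        (fun k => [pvOpenL (i + 1 + k), if k < r + 1 - 1 then pvNestedL (i + 1 + k) else pvValL (i + 1 + k)]) := by
    rw [List.range_succ_eq_map]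
    simp only [List.flatMap_cons, List.flatMap_map, Nat.add_zero]
    rw [if_pos (by omega : (0 : Nat) < r + 2 - 1)]
    congr 1
    apply List.flatMap_congr
    intro k _
    have h1 : i + Nat.succ k = i + 1 + k := by omega
    have h2 : (Nat.succ k < r + 2 - 1) ↔ (k < r + 1 - 1) := by omega
    rw [h1, if_congr h2 rfl rfl]
  have hB : (List.range (r + 2)).reverse.map (fun k => pvCloseL (i + k))
      = (List.range (r + 1)).reverse.map (fun k => pvCloseL (i + 1 + k)) ++ [pvCloseL i] := by
    rw [List.range_succ_eq_map, List.reverse_cons, List.map_append, List.map_reverse,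
        List.map_map, ← List.map_reverse]
    congr 1
    · apply List.map_congr_left
      intro k _
      show pvCloseL (i + Nat.succ k) = pvCloseL (i + 1 + k)
      congr 1
      omega
  rw [hA, hB]
  simp only [List.cons_append, List.nil_append, List.append_assoc]

-- the innermost struct alone
theorem pvLines_one (i : Nat) : pvLines i 1 = [pvOpenL i, pvValL i, pvCloseL i] := by
  simp [pvLines]

-- wrapping m outer structs around the block for the structs from m on gives the block from 0 on
theorem pvwrap (m : Nat) : ∀ k : Nat,
    (List.map (fun (j : Nat) => (j : Int)) (List.range m)).foldr
      (fun i lines =>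
        [PySem.List.pyRepeat "    ".toList i ++ "struct S".toList ++ PySem.Int.toChars i ++ " {".toList,
         PySem.List.pyRepeat "    ".toList i ++ "    S".toList ++ PySem.Int.toChars (i + 1) ++ " nested;".toList]
        ++ lines ++ [PySem.List.pyRepeat "    ".toList i ++ "}".toList])
      (pvLines m (k + 1)) = pvLines 0 (m + k + 1) := by
  induction m with
  | zero => intro k; simp
  | succ m ih =>
    intro k
    rw [List.range_succ, List.map_append, List.foldr_append]
    have hstep :
        ([PySem.List.pyRepeat "    ".toList (m : Int) ++ "struct S".toList ++ PySem.Int.toChars (m : Int) ++ " {".toList,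
          PySem.List.pyRepeat "    ".toList (m : Int) ++ "    S".toList ++ PySem.Int.toChars ((m : Int) + 1) ++ " nested;".toList]
         ++ pvLines (m + 1) (k + 1) ++ [PySem.List.pyRepeat "    ".toList (m : Int) ++ "}".toList])
        = pvLines m (k + 2) := by
      rw [pvLines_succ m k]
      simp [pvOpenL, pvNestedL, pvCloseL, pvInd]
    simp only [List.map_cons, List.map_nil, List.foldr_cons, List.foldr_nil]
    rw [hstep, ih (k + 1)]
    congr 1
    omega

-- B, at a positive depth n + 1, also builds exactly pvLines 0 (n + 1)
theorem pvB_eq_lines (n : Nat) :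
    generate_struct_hierarchy_alt ((n + 1 : Nat) : Int)
      = String.ofList (PySem.Chars.join "\n".toList (pvLines 0 (n + 1))) := by
  simp only [generate_struct_hierarchy_alt]
  rw [if_neg (by omega : ¬ ((n + 1 : Nat) : Int) ≤ 0)]
  have h2 : PySem.List.pyRange (((n + 1 : Nat) : Int) - 2) (-1) (-1)
      = (List.map (fun (j : Nat) => (j : Int)) (List.range n)).reverse := by
    rw [PySem.List.pyRange_neg_one_eq_reverse,
        show (-1 : Int) + 1 = 0 from by norm_num,
        show (((n + 1 : Nat) : Int) - 2) + 1 = (n : Int) from by push_cast; ring,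
        PySem.List.pyRange_zero_nat n]
  rw [h2, List.foldl_reverse]
  have hbase :
      ([PySem.List.pyRepeat "    ".toList (((n + 1 : Nat) : Int) - 1) ++ "struct S".toList ++ PySem.Int.toChars (((n + 1 : Nat) : Int) - 1) ++ " {".toList,
        PySem.List.pyRepeat "    ".toList (((n + 1 : Nat) : Int) - 1) ++ "    int value;".toList,
        PySem.List.pyRepeat "    ".toList (((n + 1 : Nat) : Int) - 1) ++ "}".toList] : List (List Char))
      = pvLines n 1 := by
    rw [pvLines_one, show (((n + 1 : Nat) : Int) - 1) = (n : Int) from by push_cast; ring]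
    simp [pvOpenL, pvValL, pvCloseL, pvInd]
  rw [hbase]
  have hw := pvwrap n 0
  rw [hw]

-- A, at depth n ≥ 0, builds exactly pvLines 0 n
theorem pvA_eq_lines (n : Nat) :
    generate_struct_hierarchy (n : Int)
      = String.ofList (PySem.Chars.join "\n".toList (pvLines 0 n)) := by
  simp only [generate_struct_hierarchy]
  rw [PySem.List.pyRange_zero_nat n]
  have h1 : PySem.List.pyRange ((n : Int) - 1) (-1) (-1)
      = (List.map (fun (k : Nat) => (k : Int)) (List.range n)).reverse := by
    rw [PySem.List.pyRange_neg_one_eq_reverse,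
        show (-1 : Int) + 1 = 0 from by norm_num,
        show ((n : Int) - 1) + 1 = (n : Int) from by ring,
        PySem.List.pyRange_zero_nat n]
  rw [h1]
  rw [pvfoldl_two (fun i : Int => PySem.List.pyRepeat "    ".toList i ++ "struct S".toList ++ PySem.Int.toChars i ++ " {".toList)
        (fun i : Int => PySem.List.pyRepeat "    ".toList i ++ "    S".toList ++ PySem.Int.toChars (i + 1) ++ " nested;".toList)
        (fun i : Int => PySem.List.pyRepeat "    ".toList i ++ "    int value;".toList)
        (fun i : Int => i < (n : Int) - 1)]
  rw [PySem.List.foldl_append_singleton_eq_map, List.nil_append, List.flatMap_map,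
      ← List.map_reverse, List.map_map]
  unfold pvLines
  congr 2
  congr 1
  · apply List.flatMap_congr
    intro k hk
    have hmem := List.mem_range.mp hk
    have hcond : ((k : Int) < (n : Int) - 1) ↔ (k < n - 1) := by omega
    rw [if_congr hcond rfl rfl]
    simp only [Nat.zero_add]
    split_ifs <;> simp [pvOpenL, pvNestedL, pvValL, pvInd, List.append_assoc]
  · apply List.map_congr_left
    intro k _
    simp [pvCloseL, pvInd, Function.comp_apply]


-- ===== VERDICT (by name: the statement is the Claim_ definition above) =====
theorem generate_struct_hierarchy_spec : Claim_equal_generate_struct_hierarchy := by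
  intro depth _
  unfold Spec_generate_struct_hierarchy
  by_cases hle : depth ≤ 0
  · have halt : generate_struct_hierarchy_alt depth = "" := by
      simp only [generate_struct_hierarchy_alt]
      rw [if_pos hle]
    rw [halt]
    unfold generate_struct_hierarchy
    rw [PySem.List.pyRange_one_eq_nil hle, PySem.List.pyRange_neg_one_eq_nil (by omega)]
    rfl
  · obtain ⟨r, hr⟩ : ∃ r : Nat, depth = ((r + 1 : Nat) : Int) :=
      ⟨depth.toNat - 1, by omega⟩
    rw [hr, pvA_eq_lines (r + 1), pvB_eq_lines r]
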